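-- pv_equiv track=rewrite | github.com/vigneshtestengineer/GRC | pages/grc_login_page.py | _normalize_ocr_text
-- ===== SOURCE A (Python) =====
-- def _normalize_ocr_text(text):
--     replacements = {
--         "|": "I",
--         "!": "I",
--         "$": "S",
--         " ": "",
--     }
--     normalized = ''.join(replacements.get(ch, ch) for ch in text if ch.isalnum() or ch in replacements)
--     return normalized.upper()
-- ===== SOURCE B (Python) =====
-- def _build_ocr_table():
--     table = {}
--     for cp in range(128):
--         ch = chr(cp)
--         if ch.isalnum():
--             table[cp] = ch.upper()
--         elif ch in "|!":
--             table[cp] = "I"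
--         elif ch == "$":
--             table[cp] = "S"
--         else:
--             table[cp] = None
--     return table
--
-- _OCR_TABLE = _build_ocr_table()
--
-- def _normalize_ocr_text(text):
--     return text.translate(_OCR_TABLE)
-- ===== Notes on version B (the rewrite author's own statement) =====
-- stated objective: faster
-- what changed: Replaced A's per-call combined filter+dict-lookup character pass (with a final upper()) by a precomputed codepoint-to-replacement translation table covering ASCII 0..127, with uppercasing folded into the table, applied via a single str.translate call.
import Mathlib
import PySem

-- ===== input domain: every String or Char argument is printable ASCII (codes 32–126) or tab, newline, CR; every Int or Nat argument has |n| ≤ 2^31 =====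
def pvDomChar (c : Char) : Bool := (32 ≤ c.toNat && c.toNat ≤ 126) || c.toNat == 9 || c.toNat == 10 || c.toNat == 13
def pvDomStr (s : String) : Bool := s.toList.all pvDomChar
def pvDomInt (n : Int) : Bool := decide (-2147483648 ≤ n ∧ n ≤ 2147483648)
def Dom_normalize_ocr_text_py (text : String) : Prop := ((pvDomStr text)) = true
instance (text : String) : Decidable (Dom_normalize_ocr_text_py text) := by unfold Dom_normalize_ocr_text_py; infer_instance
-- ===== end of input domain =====

-- B replaces A's per-call filter+dict-lookup pass by a precomputed codepoint translation table
-- (uppercasing folded into the table) applied with one str.translate pass (objective: faster, constant-factor).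


-- ===== PORT A =====
def normalize_ocr_text_py (text : String) : String :=
  let replacements : PySem.Dict Char String :=
    PySem.Dict.ofList [('|', "I"), ('!', "I"), ('$', "S"), (' ', "")]
  let normalized : String :=
    PySem.Str.join ""
      ((text.toList.filter (fun ch => PySem.Chars.isalnum ch || replacements.contains ch)).map
        (fun ch => replacements.getD ch (String.ofList [ch])))
  PySem.Str.upper normalized

-- ===== PORT B =====
-- _build_ocr_table: a codepoint → (replacement string | deletion) table for ASCII 0..127
def pvOcrTable : PySem.Dict Int (Option String) :=
  (PySem.List.pyRange 0 128 1).foldl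
    (fun table cp =>
      let ch : Char := Char.ofNat cp.toNat
      if PySem.Chars.isalnum ch then
        table.insert cp (some (PySem.Str.upper (String.ofList [ch])))
      else if PySem.Str.isIn (String.ofList [ch]) "|!" then
        table.insert cp (some "I")
      else if ch = '$' then
        table.insert cp (some "S")
      else
        table.insert cp none)
    PySem.Dict.empty

-- text.translate(_OCR_TABLE), ported by hand (exact: a mapped codepoint is replaced by its string,
-- a codepoint mapped to None is deleted, a codepoint missing from the table passes through)
def normalize_ocr_text_py_alt (text : String) : String :=
  String.ofList
    (text.toList.flatMap (fun ch =>
      match pvOcrTable.get? ((ch.toNat : Int)) with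
      | none => [ch]
      | some none => []
      | some (some s) => s.toList))

-- ===== PRECONDITION & SPEC =====
def Spec_normalize_ocr_text_py (text : String) (out : String) : Prop := out = normalize_ocr_text_py_alt text
instance (text : String) (out : String) : Decidable (Spec_normalize_ocr_text_py text out) := by unfold Spec_normalize_ocr_text_py; infer_instance

-- ===== CLAIM (what is proved, stated in full; the proofs are below) =====
def Claim_equal_normalize_ocr_text_py : Prop := ∀ (text : String), Dom_normalize_ocr_text_py text → Spec_normalize_ocr_text_py text (normalize_ocr_text_py text)

-- ===== LEMMAS AND PROOFS =====

-- A's per-character contribution (filter condition + dict lookup, with the final upper() pushed inward)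
def pvA1 (ch : Char) : List Char :=
  let replacements : PySem.Dict Char String :=
    PySem.Dict.ofList [('|', "I"), ('!', "I"), ('$', "S"), (' ', "")]
  if PySem.Chars.isalnum ch || replacements.contains ch then
    PySem.Chars.upper (replacements.getD ch (String.ofList [ch])).toList
  else []

-- B's per-character contribution (one table lookup)
def pvB1 (ch : Char) : List Char :=
  match pvOcrTable.get? ((ch.toNat : Int)) with
  | none => [ch]
  | some none => []
  | some (some s) => s.toList

theorem pv_join_nil_flatten (xss : List (List Char)) :
    PySem.Chars.join [] xss = xss.flatten := by
  induction xss with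
  | nil => simp [PySem.Chars.join_nil]
  | cons a rest ih =>
      cases rest with
      | nil => simp [PySem.Chars.join_singleton]
      | cons b r =>
          have := PySem.Chars.join_cons_cons ([] : List Char) a b r
          simp only [this, ih, List.flatten_cons, List.append_nil]

theorem pv_A_toList (text : String) :
    (normalize_ocr_text_py text).toList = text.toList.flatMap pvA1 := by
  unfold normalize_ocr_text_py
  have e0 : "".toList = ([] : List Char) := rfl
  simp only [PySem.Str.toList_upper, PySem.Str.toList_join, e0, pv_join_nil_flatten,
    List.map_map, PySem.Chars.upper, List.map_flatten]
  induction text.toList with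
  | nil => simp
  | cons c t ih =>
      by_cases hc : (PySem.Chars.isalnum c ||
          (PySem.Dict.ofList [('|', "I"), ('!', "I"), ('$', "S"), (' ', "")]).contains c) = true
      · simp [hc, ih, pvA1, PySem.Chars.upper]
      · simp [hc, ih, pvA1]

theorem pv_B_toList (text : String) :
    (normalize_ocr_text_py_alt text).toList = text.toList.flatMap pvB1 := by
  unfold normalize_ocr_text_py_alt pvB1
  simp [String.toList_ofList]

set_option maxRecDepth 4096 in
theorem pv_char128 : ∀ n ∈ List.range 128, pvA1 (Char.ofNat n) = pvB1 (Char.ofNat n) := by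
  decide

theorem pv_char (c : Char) (h : pvDomChar c = true) : pvA1 c = pvB1 c := by
  have hlt : c.toNat < 128 := by
    unfold pvDomChar at h
    simp only [Bool.or_eq_true, Bool.and_eq_true, decide_eq_true_eq, beq_iff_eq] at h
    omega
  have := pv_char128 c.toNat (List.mem_range.mpr hlt)
  simpa [Char.ofNat_toNat] using this

-- ===== VERDICT (by name: the statement is the Claim_ definition above) =====
theorem normalize_ocr_text_py_spec : Claim_equal_normalize_ocr_text_py := by
  intro text hdom
  unfold Spec_normalize_ocr_text_py
  have hchars : ∀ c ∈ text.toList, pvDomChar c = true := by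
    simpa [Dom_normalize_ocr_text_py, pvDomStr, List.all_eq_true] using hdom
  apply String.toList_injective
  rw [pv_A_toList, pv_B_toList]
  exact List.flatMap_congr (fun c hc => pv_char c (hchars c hc))
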